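-- pv_equiv track=rewrite | github.com/anmhrk/reactchat | backend/api/rag.py | split_into_logical_sections
-- ===== SOURCE A (Python) =====
-- from typing import List
--
-- def split_into_logical_sections(content: str) -> List[str]:
--     sections = []
--     current_section = []
--
--     for line in content.split("\n"):
--         if (
--             line.strip().startswith("function ")
--             or line.strip().startswith("class ")
--             or line.strip().startswith("const ")
--             or line.strip().startswith("export ")
--         ):
--
--             if current_section:
--                 sections.append("\n".join(current_section))
--             current_section = []
--
--         current_section.append(line)
--
--     if current_section:
--         sections.append("\n".join(current_section))
--
--     return sections
-- ===== SOURCE B (Python) =====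
-- def split_into_logical_sections(content):
--     def is_decl(line):
--         return line.strip().startswith(("function ", "class ", "const ", "export "))
--
--     def chunks(lines):
--         if not lines:
--             return []
--         head, rest = lines[0], lines[1:]
--         i = 0
--         while i < len(rest) and not is_decl(rest[i]):
--             i += 1
--         return [[head] + rest[:i]] + chunks(rest[i:])
--
--     return ["\n".join(c) for c in chunks(content.split("\n"))]
-- ===== Notes on version B (the rewrite author's own statement) =====
-- stated objective: alternative
-- what changed: Replaces the flush-on-boundary accumulator loop with a recursive boundary-then-slice decomposition: each call finds the next declaration line and slices one whole section off the front.
import Mathlib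
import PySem

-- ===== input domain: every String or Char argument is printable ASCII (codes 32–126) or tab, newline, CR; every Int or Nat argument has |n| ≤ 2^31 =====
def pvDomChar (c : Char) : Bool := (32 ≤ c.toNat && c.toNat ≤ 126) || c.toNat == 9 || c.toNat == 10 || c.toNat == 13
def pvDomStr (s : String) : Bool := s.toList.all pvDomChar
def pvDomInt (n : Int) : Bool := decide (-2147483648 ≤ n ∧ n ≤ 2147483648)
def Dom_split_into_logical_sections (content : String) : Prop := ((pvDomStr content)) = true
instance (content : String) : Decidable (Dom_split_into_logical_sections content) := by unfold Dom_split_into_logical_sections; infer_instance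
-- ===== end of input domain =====

-- B replaces A's flush-on-boundary accumulator loop by a recursive boundary-then-slice
-- decomposition (find next declaration line, slice one section off the front); alternative, not faster.

-- ===== PORT A =====
def pvIsDeclA (line : String) : Bool :=
  PySem.Str.startswith (PySem.Str.strip line) "function "
  || PySem.Str.startswith (PySem.Str.strip line) "class "
  || PySem.Str.startswith (PySem.Str.strip line) "const "
  || PySem.Str.startswith (PySem.Str.strip line) "export "

-- loop body of A: maybe flush and reset current_section, then append the line
def pvStepA (st : List String × List String) (line : String) : List String × List String :=
  let st := if pvIsDeclA line then
      ((if st.2 ≠ [] then st.1 ++ [PySem.Str.join "\n" st.2] else st.1), ([] : List String))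
    else st
  (st.1, st.2 ++ [line])

def split_into_logical_sections (content : String) : List String :=
  let st := ((PySem.Chars.splitOn content.toList ['\n']).map String.ofList).foldl pvStepA ([], [])
  if st.2 ≠ [] then st.1 ++ [PySem.Str.join "\n" st.2] else st.1

-- ===== PORT B =====
def pvIsDeclB (line : String) : Bool :=
  ["function ", "class ", "const ", "export "].any
    (fun k => PySem.Str.startswith (PySem.Str.strip line) k)

-- port of B's while loop: number of leading non-declaration lines
def pvFirstDeclIdx : List String → Nat
  | [] => 0
  | l :: ls => if pvIsDeclB l then 0 else pvFirstDeclIdx ls + 1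

def pvChunks : List String → List (List String)
  | [] => []
  | head :: rest =>
    let i := pvFirstDeclIdx rest
    ([head] ++ rest.take i) :: pvChunks (rest.drop i)
  termination_by ls => ls.length
  decreasing_by simp [List.length_drop]

def split_into_logical_sections_alt (content : String) : List String :=
  (pvChunks ((PySem.Chars.splitOn content.toList ['\n']).map String.ofList)).map (PySem.Str.join "\n")

-- ===== PRECONDITION & SPEC =====
def Spec_split_into_logical_sections (content : String) (out : List String) : Prop := out = split_into_logical_sections_alt content
instance (content : String) (out : List String) : Decidable (Spec_split_into_logical_sections content out) := by unfold Spec_split_into_logical_sections; infer_instance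

-- ===== CLAIM (what is proved, stated in full; the proofs are below) =====
def Claim_equal_split_into_logical_sections : Prop := ∀ (content : String), Dom_split_into_logical_sections content → Spec_split_into_logical_sections content (split_into_logical_sections content)

-- ===== LEMMAS AND PROOFS =====
lemma pvIsDecl_eq (l : String) : pvIsDeclA l = pvIsDeclB l := by
  simp [pvIsDeclA, pvIsDeclB, Bool.or_assoc]

lemma pvChunks_nil : pvChunks [] = [] := by rw [pvChunks.eq_def]

lemma pvChunks_cons (l : String) (ls : List String) :
    pvChunks (l :: ls)
      = ([l] ++ ls.take (pvFirstDeclIdx ls)) :: pvChunks (ls.drop (pvFirstDeclIdx ls)) := by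
  rw [pvChunks.eq_def]

def pvFinal (st : List String × List String) : List String :=
  if st.2 ≠ [] then st.1 ++ [PySem.Str.join "\n" st.2] else st.1

def pvFinish (cur ls : List String) : List String :=
  let i := pvFirstDeclIdx ls
  (if cur ++ ls.take i = [] then [] else [PySem.Str.join "\n" (cur ++ ls.take i)])
    ++ (pvChunks (ls.drop i)).map (PySem.Str.join "\n")

lemma pvLoop_eq : ∀ (ls secs cur : List String),
    pvFinal (ls.foldl pvStepA (secs, cur)) = secs ++ pvFinish cur ls := by
  intro ls
  induction ls with
  | nil =>
    intro secs cur
    by_cases h : cur = [] <;>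
      simp [pvFinal, pvFinish, pvFirstDeclIdx, pvChunks_nil, h]
  | cons l ls ih =>
    intro secs cur
    by_cases h : pvIsDeclA l
    · have hb : pvIsDeclB l = true := (pvIsDecl_eq l) ▸ h
      have step : pvStepA (secs, cur) l
          = ((if cur ≠ [] then secs ++ [PySem.Str.join "\n" cur] else secs), [l]) := by
        simp [pvStepA, h]
      rw [List.foldl_cons, step, ih]
      by_cases hc : cur = [] <;>
        simp [pvFinish, pvFirstDeclIdx, hb, hc, pvChunks_cons]
    · have hb : pvIsDeclB l = false := by
        rw [← pvIsDecl_eq]; exact Bool.eq_false_iff.mpr h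
      have step : pvStepA (secs, cur) l = (secs, cur ++ [l]) := by
        simp [pvStepA, h]
      rw [List.foldl_cons, step, ih]
      simp [pvFinish, pvFirstDeclIdx, hb, List.append_assoc]

lemma pvFinish_nil (ls : List String) :
    pvFinish [] ls = (pvChunks ls).map (PySem.Str.join "\n") := by
  cases ls with
  | nil => simp [pvFinish, pvFirstDeclIdx, pvChunks_nil]
  | cons l ls =>
    by_cases hb : pvIsDeclB l <;>
      simp [pvFinish, pvFirstDeclIdx, hb, pvChunks_cons]

-- ===== VERDICT (by name: the statement is the Claim_ definition above) =====
theorem split_into_logical_sections_spec : Claim_equal_split_into_logical_sections := by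
  intro content _
  show split_into_logical_sections content = split_into_logical_sections_alt content
  unfold split_into_logical_sections split_into_logical_sections_alt
  have := pvLoop_eq ((PySem.Chars.splitOn content.toList ['\n']).map String.ofList) [] []
  rw [← pvFinish_nil]
  simpa [pvFinal] using this
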